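-- pv_equiv track=rewrite | github.com/HansBug/hbutils | hbutils/reflection/iter.py | _yield_progressive_for
-- ===== SOURCE A (Python) =====
-- from itertools import tee, chain, islice
-- from typing import Iterator, Iterable, Tuple, TypeVar
--
-- _ItemType = TypeVar('_ItemType')
--
-- def _yield_progressive_for(iterable: Iterable[_ItemType], n: int, offset: int) -> Iterator[Tuple[_ItemType, ...]]:
--     """
--     Internal function to yield progressive for-loop iterations.
--
--     :param iterable: The iterable object to iterate over.
--     :type iterable: Iterable[_ItemType]
--     :param n: Depth of the loop (number of nested levels).
--     :type n: int
--     :param offset: Number of positions to skip between levels.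
--     :type offset: int
--
--     :return: Iterator yielding tuples of progressively selected items.
--     :rtype: Iterator[Tuple[_ItemType, ...]]
--     """
--
--     def _recursion(deep, iters, selections: list):
--         """
--         Recursively generate progressive combinations.
--
--         :param deep: Current recursion depth.
--         :type deep: int
--         :param iters: List containing the current iterator.
--         :type iters: list
--         :param selections: List of currently selected items.
--         :type selections: list
--
--         :return: Iterator yielding tuples of selected items.
--         :rtype: Iterator[Tuple[_ItemType, ...]]
--         """
--         if deep >= n:
--             yield tuple(selections)
--         else:
--             iters[0], new_iter = tee(iters[0])
--             if deep > 0: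
--                 actual_iter = islice(chain(selections[-1:], new_iter), offset, None)
--             else:
--                 actual_iter = new_iter
--
--             while True:
--                 try:
--                     item = next(actual_iter)
--                 except (StopIteration, StopAsyncIteration):
--                     break
--
--                 selections.append(item)
--                 iter_proxy = [actual_iter]
--                 yield from _recursion(deep + 1, iter_proxy, selections)
--                 (actual_iter,) = iter_proxy
--                 selections.pop()
--
--     yield from _recursion(0, [iterable], [])
-- ===== SOURCE B (Python) =====
-- def _yield_progressive_for(iterable, n, offset):
--     items = list(iterable)
--
--     def _gen(start, k):
--         if k <= 0:
--             yield ()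
--         else:
--             for i in range(start, len(items)):
--                 for rest in _gen(i + offset, k - 1):
--                     yield (items[i],) + rest
--
--     yield from _gen(0, n)
-- ===== Notes on version B (the rewrite author's own statement) =====
-- stated objective: simpler
-- what changed: A's lazy tee/chain/islice iterator recursion with a shared mutable selections list is replaced by a plain index-based recursion: each level scans range(start, len(items)) and the next level restarts at i + offset, with no iterator cloning or mutable state.
import Mathlib
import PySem

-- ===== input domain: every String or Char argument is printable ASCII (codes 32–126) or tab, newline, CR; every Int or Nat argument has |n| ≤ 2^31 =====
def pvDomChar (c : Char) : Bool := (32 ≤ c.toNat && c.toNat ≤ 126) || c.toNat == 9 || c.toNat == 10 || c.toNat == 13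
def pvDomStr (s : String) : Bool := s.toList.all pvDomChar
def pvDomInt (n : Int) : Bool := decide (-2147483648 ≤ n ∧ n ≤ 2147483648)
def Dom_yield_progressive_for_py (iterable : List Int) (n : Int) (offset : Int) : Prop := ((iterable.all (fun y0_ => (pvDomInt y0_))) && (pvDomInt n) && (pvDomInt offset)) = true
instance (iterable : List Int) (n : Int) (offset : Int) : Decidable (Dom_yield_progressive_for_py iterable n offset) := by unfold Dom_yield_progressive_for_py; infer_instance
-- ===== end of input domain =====

-- B replaces A's recursive generator over tee/chain/islice iterators by a plain
-- index-based recursion (each level scans range(start, len) with start = i + offset);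
-- objective: simpler. Equivalence is about the returned (materialised) sequence of tuples.

-- ===== PORT A =====
-- Transliteration of A's `_recursion`: the lazy iterator state is modelled by the list
-- suffix that the iterator has not yet produced.  `tee` gives the inner call an
-- independent copy of the remaining stream, so the outer loop continues on the same
-- suffix `r` after the inner recursion — exactly what `iter_proxy`/tee achieve.
-- `selections[-1:]` is `sel.drop (sel.length - 1)`; `islice(…, offset, None)` is
-- `.drop offset.toNat` (exact for offset ≥ 0; Python raises ValueError for offset < 0,
-- excluded by Pre_).  fuel = (n - deep).toNat bounds the recursion depth; the 0 branch
-- is unreachable when deep < n.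
mutual
def pvRecA (n offset : Int) (fuel : Nat) (deep : Int) (iters selections : List Int) : List (List Int) :=
  if deep ≥ n then [selections]
  else
    match fuel with
    | 0 => []
    | f + 1 =>
      let actual : List Int :=
        if deep > 0 then ((selections.drop (selections.length - 1)) ++ iters).drop offset.toNat
        else iters
      pvLoopA n offset f deep selections actual
termination_by (fuel, 0)
def pvLoopA (n offset : Int) (fuel : Nat) (deep : Int) (sel actual : List Int) : List (List Int) :=
  match actual with
  | [] => []
  | item :: rest =>
      pvRecA n offset fuel (deep + 1) rest (sel ++ [item]) ++ pvLoopA n offset fuel deep sel rest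
termination_by (fuel, actual.length + 1)
end

def yield_progressive_for_py (iterable : List Int) (n : Int) (offset : Int) : List (List Int) :=
  pvRecA n offset n.toNat 0 iterable []

-- ===== PORT B =====
-- Transliteration of Source B's `_gen(start, k)`: scan indices i in range(start, len(items)),
-- prepend items[i] to every tuple of the recursive call at start = i + offset.
def pvGenB (items : List Int) (offset : Int) (start k : Int) : List (List Int) :=
  if k ≤ 0 then [[]]
  else
    (PySem.List.pyRange start (PySem.List.len items) 1).flatMap (fun i =>
      (pvGenB items offset (i + offset) (k - 1)).map (fun rest =>
        (PySem.List.pyGetD items i 0) :: rest))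
termination_by k.toNat
decreasing_by simp_wf; omega

def yield_progressive_for_py_alt (iterable : List Int) (n : Int) (offset : Int) : List (List Int) :=
  pvGenB iterable offset 0 n

-- ===== PRECONDITION & SPEC =====
-- Pre_ excludes exactly the inputs on which A raises ValueError (islice with a negative
-- offset, reached whenever n ≥ 2 and the iterable is nonempty).
def Pre_yield_progressive_for_py (iterable : List Int) (n : Int) (offset : Int) : Prop :=
  0 ≤ offset ∨ n ≤ 1 ∨ iterable = []
instance (iterable : List Int) (n : Int) (offset : Int) : Decidable (Pre_yield_progressive_for_py iterable n offset) := by unfold Pre_yield_progressive_for_py; infer_instance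

def pvWitness_yield_progressive_for_py : List Int × Int × Int := ([1, 2, 3], 2, 1)

def Spec_yield_progressive_for_py (iterable : List Int) (n : Int) (offset : Int) (out : List (List Int)) : Prop := out = yield_progressive_for_py_alt iterable n offset
instance (iterable : List Int) (n : Int) (offset : Int) (out : List (List Int)) : Decidable (Spec_yield_progressive_for_py iterable n offset out) := by unfold Spec_yield_progressive_for_py; infer_instance

-- ===== CLAIM (what is proved, stated in full; the proofs are below) =====
def Claim_equal_yield_progressive_for_py : Prop := ∀ (iterable : List Int) (n : Int) (offset : Int), Dom_yield_progressive_for_py iterable n offset → Pre_yield_progressive_for_py iterable n offset → Spec_yield_progressive_for_py iterable n offset (yield_progressive_for_py iterable n offset)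

-- ===== LEMMAS AND PROOFS =====

theorem pvLoopA_nil (n offset : Int) (fuel : Nat) (deep : Int) (sel : List Int) :
    pvLoopA n offset fuel deep sel [] = [] := by
  rw [pvLoopA]

theorem pvLoopA_cons (n offset : Int) (fuel : Nat) (deep : Int) (sel : List Int)
    (item : Int) (rest : List Int) :
    pvLoopA n offset fuel deep sel (item :: rest) =
      pvRecA n offset fuel (deep + 1) rest (sel ++ [item]) ++
        pvLoopA n offset fuel deep sel rest := by
  rw [pvLoopA]

theorem pvGenB_empty (items : List Int) (offset s k : Int)
    (hk : ¬ k ≤ 0) (hs : (items.length : Int) ≤ s) :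
    pvGenB items offset s k = [] := by
  rw [pvGenB]
  simp [hk, PySem.List.len_eq, PySem.List.pyRange_one_eq_nil hs]

theorem pvKey0 (items : List Int) (offset n : Int) :
    ∀ (d i : Nat) (sel : List Int), i ≤ items.length → items.length - i = d →
      pvLoopA n offset 0 (n - 1) sel (items.drop i) =
        (pvGenB items offset (i : Int) 1).map (fun t => sel ++ t) := by
  intro d
  induction d with
  | zero =>
    intro i sel hi hd
    have hie : i = items.length := by omega
    subst hie
    rw [List.drop_length, pvLoopA_nil, pvGenB_empty items offset _ 1 (by norm_num) (by omega)]
    rfl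
  | succ d ih =>
    intro i sel hi hd
    have hlt : i < items.length := by omega
    rw [List.drop_eq_getElem_cons hlt, pvLoopA_cons]
    have hrec : pvRecA n offset 0 (n - 1 + 1) (items.drop (i + 1)) (sel ++ [items[i]]) =
        [sel ++ [items[i]]] := by
      rw [pvRecA]; simp
    rw [hrec, ih (i + 1) sel (by omega) (by omega)]
    conv_rhs => rw [pvGenB]
    rw [if_neg (by norm_num)]
    rw [PySem.List.len_eq, PySem.List.pyRange_one_cons (by exact_mod_cast hlt)]
    rw [List.flatMap_cons]
    have hz : pvGenB items offset ((i : Int) + offset) (1 - 1) = [[]] := by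
      rw [pvGenB]; simp
    rw [hz]
    have hcast : ((i : Int) + 1) = ((i + 1 : Nat) : Int) := by push_cast; ring
    rw [hcast]
    have htail : (PySem.List.pyRange ((i + 1 : Nat) : Int) (items.length : Int) 1).flatMap
        (fun j => (pvGenB items offset (j + offset) (1 - 1)).map
          (fun rest => PySem.List.pyGetD items j 0 :: rest)) =
        pvGenB items offset ((i + 1 : Nat) : Int) 1 := by
      conv_rhs => rw [pvGenB]
      rw [if_neg (by norm_num), PySem.List.len_eq]
    rw [htail, List.map_append, List.map_map]
    congr 1
    simp [PySem.List.pyGetD_natCast, List.getElem?_eq_getElem hlt]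

theorem pvLastSlice (sel : List Int) (x : Int) :
    (sel ++ [x]).drop ((sel ++ [x]).length - 1) = [x] := by
  simp

-- main bridge: A's loop at fuel f over the suffix items.drop i equals B's level k = f+1
-- started at index i, with the selections prefix mapped on.
theorem pvKey (items : List Int) (offset : Int) (hoff : 0 ≤ offset) (n : Int) :
    ∀ (f : Nat), (f : Int) < n →
      ∀ (d i : Nat) (sel : List Int), i ≤ items.length → items.length - i = d →
        pvLoopA n offset f (n - 1 - (f : Int)) sel (items.drop i) =
          (pvGenB items offset (i : Int) ((f : Int) + 1)).map (fun t => sel ++ t) := by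
  intro f
  induction f with
  | zero =>
    intro _ d i sel hi hd
    have := pvKey0 items offset n d i sel hi hd
    simpa using this
  | succ f ihf =>
    intro hfn d
    induction d with
    | zero =>
      intro i sel hi hd
      have hie : i = items.length := by omega
      subst hie
      rw [List.drop_length, pvLoopA_nil,
        pvGenB_empty items offset _ _ (by push_cast; omega) (by omega)]
      rfl
    | succ d ihd =>
      intro i sel hi hd
      have hlt : i < items.length := by omega
      have hfn' : (f : Int) < n := by push_cast at hfn ⊢; omega
      have hx := List.drop_eq_getElem_cons hlt
      rw [hx, pvLoopA_cons]
      set x := items[i] with hxdef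
      set w := offset.toNat with hwdef
      have hwoff : (w : Int) = offset := Int.toNat_of_nonneg hoff
      -- unfold the recursive A call
      have hrec : pvRecA n offset (f + 1) (n - 1 - (((f + 1 : Nat)) : Int) + 1)
          (items.drop (i + 1)) (sel ++ [x]) =
          pvLoopA n offset f (n - 1 - (f : Int)) (sel ++ [x]) (items.drop (w + i)) := by
        rw [pvRecA, if_neg (by push_cast; omega)]
        have hpos : n - 1 - (((f + 1 : Nat)) : Int) + 1 > 0 := by push_cast at hfn ⊢; omega
        simp only [if_pos hpos, pvLastSlice]
        rw [List.singleton_append, ← hx, List.drop_drop,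
          show i + offset.toNat = w + i by omega]
        congr 1
        omega
      rw [hrec]
      -- evaluate the inner loop: outer IH or empty suffix
      have hinner : pvLoopA n offset f (n - 1 - (f : Int)) (sel ++ [x]) (items.drop (w + i)) =
          (pvGenB items offset ((i : Int) + offset) ((f : Int) + 1)).map
            (fun t => (sel ++ [x]) ++ t) := by
        by_cases hle : w + i ≤ items.length
        · have := ihf hfn' (items.length - (w + i)) (w + i) (sel ++ [x]) hle rfl
          rw [this]
          congr 2
          rw [← hwoff]
          push_cast
          ring
        · rw [List.drop_eq_nil_of_le (by omega), pvLoopA_nil,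
            pvGenB_empty items offset _ _ (by omega) (by omega)]
          rfl
      rw [hinner]
      -- unfold B one step on the right
      conv_rhs => rw [pvGenB]
      rw [if_neg (by push_cast; omega), PySem.List.len_eq,
        PySem.List.pyRange_one_cons (by exact_mod_cast hlt), List.flatMap_cons]
      have hcast : ((i : Int) + 1) = ((i + 1 : Nat) : Int) := by push_cast; ring
      have htail : (PySem.List.pyRange ((i + 1 : Nat) : Int) (items.length : Int) 1).flatMap
          (fun j => (pvGenB items offset (j + offset) ((((f + 1 : Nat)) : Int) + 1 - 1)).map
            (fun rest => PySem.List.pyGetD items j 0 :: rest)) =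
          pvGenB items offset ((i + 1 : Nat) : Int) ((((f + 1 : Nat)) : Int) + 1) := by
        conv_rhs => rw [pvGenB]
        rw [if_neg (by push_cast; omega), PySem.List.len_eq]
      rw [hcast, htail, List.map_append,
        ihd (i + 1) sel (by omega) (by omega)]
      congr 1
      have hk : (((f + 1 : Nat)) : Int) + 1 - 1 = (f : Int) + 1 := by push_cast; ring
      rw [hk, List.map_map]
      congr 1
      funext t
      have hg : PySem.List.pyGetD items (i : Int) 0 = x := by
        simp [PySem.List.pyGetD_natCast, hxdef, List.getD_eq_getElem?_getD,
          List.getElem?_eq_getElem hlt]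
      simp [hg]

-- ===== VERDICT (by name: the statement is the Claim_ definition above) =====
theorem pvMainPos (iterable : List Int) (n offset : Int) (hn : 0 < n) :
    yield_progressive_for_py iterable n offset =
      pvLoopA n offset (n.toNat - 1) 0 [] iterable := by
  unfold yield_progressive_for_py
  rw [show n.toNat = (n.toNat - 1) + 1 by omega, pvRecA, if_neg (by omega)]
  simp

theorem yield_progressive_for_py_spec : Claim_equal_yield_progressive_for_py := by
  intro iterable n offset _ hpre
  unfold Spec_yield_progressive_for_py yield_progressive_for_py_alt
  by_cases hn0 : n ≤ 0
  · unfold yield_progressive_for_py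
    rw [pvRecA.eq_def, if_pos (by omega), pvGenB, if_pos hn0]
  · have hn : 0 < n := by omega
    rw [pvMainPos iterable n offset hn]
    rcases hpre with hoff | hn1 | hnil
    · -- offset ≥ 0: the main bridge lemma at f = n.toNat - 1, i = 0
      have hkey := pvKey iterable offset hoff n (n.toNat - 1) (by omega)
        iterable.length 0 [] (by omega) (by omega)
      rw [List.drop_zero, show (n - 1 - ((n.toNat - 1 : Nat) : Int)) = 0 by omega,
        show (((n.toNat - 1 : Nat) : Int) + 1) = n by omega] at hkey
      rw [hkey]
      simp
    · -- n = 1 (any offset): the base bridge lemma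
      have hne : n = 1 := by omega
      subst hne
      have hkey := pvKey0 iterable offset 1 iterable.length 0 [] (by omega) (by omega)
      rw [List.drop_zero] at hkey
      simpa using hkey
    · -- empty iterable
      subst hnil
      rw [pvLoopA_nil, pvGenB_empty _ _ _ _ (by omega) (by simp)]
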